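-- pv_equiv track=rewrite | github.com/draganpinsent00/Systematix | rng.py | _compute_bridge_order
-- ===== SOURCE A (Python) =====
-- def _compute_bridge_order(n: int):
--     """Compute a Brownian-bridge ordering of indices 0..n-1.
--
--     We will ensure the last index (n) is produced first (endpoint), followed by midpoints
--     recursively; this ordering is suitable for bridge construction where endpoint is drawn
--     first then midpoints conditioned on known endpoints.
--     """
--     order = []
--     # we will work with node indices 1..n (positions at times i/n). We'll store indices 1..n
--     def rec(l, r):
--         if l > r:
--             return
--         mid = (l + r) // 2
--         order.append(mid)
--         rec(l, mid - 1)
--         rec(mid + 1, r)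
--     # include final time n first
--     order.append(n)
--     rec(0, n - 1)
--     # convert node indices in 1..n to zero-based increments positions 0..n-1
--     # remove any duplicates and clamp
--     seen = set()
--     final_order = []
--     for idx in order:
--         if idx < 1 or idx > n:
--             continue
--         pos = idx - 1
--         if pos not in seen:
--             final_order.append(pos)
--             seen.add(pos)
--     # if somehow we are missing positions, append them
--     for p in range(n):
--         if p not in seen:
--             final_order.append(p)
--     return final_order
-- ===== SOURCE B (Python) =====
-- def _compute_bridge_order(n: int):
--     # Simpler: iterative midpoint walk with an explicit range stack; positions are
--     # emitted shifted directly (no dedup set, no fill pass -- the walk already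
--     # yields each position exactly once).
--     if n < 1:
--         return []
--     result = [n - 1]
--     stack = [(0, n - 1)]
--     while stack:
--         l, r = stack.pop()
--         if l > r:
--             continue
--         mid = (l + r) // 2
--         if mid >= 1:
--             result.append(mid - 1)
--         stack.append((mid + 1, r))
--         stack.append((l, mid - 1))
--     return result
-- ===== Notes on version B (the rewrite author's own statement) =====
-- stated objective: simpler
-- what changed: Replaces the recursive midpoint helper with an explicit stack of (l, r) ranges and emits the zero-based positions directly while traversing, dropping A's order list, seen-set dedup pass and fill-missing pass (which never fire: the midpoint walk already yields each position exactly once).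
import Mathlib
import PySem

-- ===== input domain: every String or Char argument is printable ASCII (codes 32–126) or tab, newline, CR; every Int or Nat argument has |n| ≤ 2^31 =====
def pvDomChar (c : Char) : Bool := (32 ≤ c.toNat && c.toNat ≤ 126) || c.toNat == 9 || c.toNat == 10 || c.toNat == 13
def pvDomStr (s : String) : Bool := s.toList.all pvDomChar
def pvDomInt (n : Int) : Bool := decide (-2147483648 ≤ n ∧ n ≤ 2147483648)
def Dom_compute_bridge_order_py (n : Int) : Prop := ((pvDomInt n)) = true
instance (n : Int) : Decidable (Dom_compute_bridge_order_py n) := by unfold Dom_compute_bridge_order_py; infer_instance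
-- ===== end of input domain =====

-- B replaces A's recursive midpoint helper by an explicit range stack and emits shifted
-- positions directly, dropping A's dedup set and fill-missing pass (objective: simpler).

-- ===== PORT A =====
-- rec(l, r): order.append(mid); rec(l, mid-1); rec(mid+1, r)  (order threaded as accumulator)
def pvRecA (l r : Int) (order : List Int) : List Int :=
  if _h : l > r then order
  else
    let mid := PySem.Int.floordiv (l + r) 2
    pvRecA (mid + 1) r (pvRecA l (mid - 1) (order ++ [mid]))
termination_by (r + 1 - l).toNat
decreasing_by
  · have hb := PySem.Int.floordiv_two_mid_bounds (show l ≤ r by omega); omega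
  · have hb := PySem.Int.floordiv_two_mid_bounds (show l ≤ r by omega); omega

def compute_bridge_order_py (n : Int) : List Int :=
  -- order = []; order.append(n); rec(0, n-1); then the seen/final_order loop over order,
  -- then the fill loop over range(n); the two loop states are (seen, final_order) pairs
  ((PySem.List.pyRange 0 n 1).foldl (fun (st : PySem.Set Int × List Int) p =>
      if p ∈ st.1 then st else (st.1, st.2 ++ [p]))
    ((pvRecA 0 (n - 1) ([] ++ [n])).foldl (fun (st : PySem.Set Int × List Int) idx =>
        if idx < 1 ∨ idx > n then st
        else
          let pos := idx - 1
          if pos ∈ st.1 then st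
          else (PySem.Set.add st.1 pos, st.2 ++ [pos]))
      (PySem.Set.ofList [], []))).2

-- ===== PORT B =====
-- while stack: pop (l, r); skip empty ranges; emit mid-1 when mid >= 1; push right, then left
-- (head of the Lean list = end of the Python list, so left is popped first)
def pvLoopB (stack : List (Int × Int)) (result : List Int) : List Int :=
  match stack with
  | [] => result
  | (l, r) :: rest =>
    if _h : l > r then pvLoopB rest result
    else
      let mid := PySem.Int.floordiv (l + r) 2
      pvLoopB ((l, mid - 1) :: (mid + 1, r) :: rest)
        (if mid ≥ 1 then result ++ [mid - 1] else result)
termination_by (stack.map (fun p => 2 * (p.2 + 1 - p.1).toNat + 1)).sum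
decreasing_by
  · simp only [List.map_cons, List.sum_cons]; omega
  · have hb := PySem.Int.floordiv_two_mid_bounds (show l ≤ r by omega)
    simp only [List.map_cons, List.sum_cons]; omega

def compute_bridge_order_py_alt (n : Int) : List Int :=
  if n < 1 then [] else pvLoopB [(0, n - 1)] [n - 1]

-- ===== PRECONDITION & SPEC =====
def Spec_compute_bridge_order_py (n : Int) (out : List Int) : Prop := out = compute_bridge_order_py_alt n
instance (n : Int) (out : List Int) : Decidable (Spec_compute_bridge_order_py n out) := by unfold Spec_compute_bridge_order_py; infer_instance

-- ===== CLAIM (what is proved, stated in full; the proofs are below) =====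
def Claim_equal_compute_bridge_order_py : Prop := ∀ (n : Int), Dom_compute_bridge_order_py n → Spec_compute_bridge_order_py n (compute_bridge_order_py n)

-- ===== LEMMAS AND PROOFS =====

-- the pure preorder sequence of midpoints of [l, r]
def pvP (l r : Int) : List Int :=
  if _h : l > r then []
  else
    let mid := PySem.Int.floordiv (l + r) 2
    mid :: (pvP l (mid - 1) ++ pvP (mid + 1) r)
termination_by (r + 1 - l).toNat
decreasing_by
  · have hb := PySem.Int.floordiv_two_mid_bounds (show l ≤ r by omega); omega
  · have hb := PySem.Int.floordiv_two_mid_bounds (show l ≤ r by omega); omega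

-- B's on-the-fly conversion of one midpoint stream
def pvConv (xs : List Int) : List Int :=
  xs.filterMap (fun m => if m ≥ 1 then some (m - 1) else none)

-- A's first conversion pass as a filterMap (skip test uses n)
def pvConvN (n : Int) (xs : List Int) : List Int :=
  xs.filterMap (fun m => if m < 1 ∨ m > n then none else some (m - 1))

theorem mem_pvP (l r x : Int) : x ∈ pvP l r ↔ l ≤ x ∧ x ≤ r := by
  fun_induction pvP l r with
  | case1 l r h => simp; omega
  | case2 l r h mid ih1 ih2 =>
    have hb : l ≤ mid ∧ mid ≤ r := PySem.Int.floordiv_two_mid_bounds (by omega)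
    simp only [List.mem_cons, List.mem_append, ih1, ih2]
    omega

theorem nodup_pvP (l r : Int) : (pvP l r).Nodup := by
  fun_induction pvP l r with
  | case1 l r h => simp
  | case2 l r h mid ih1 ih2 =>
    have hb : l ≤ mid ∧ mid ≤ r := PySem.Int.floordiv_two_mid_bounds (by omega)
    simp only [List.nodup_cons, List.nodup_append, List.mem_append, mem_pvP]
    refine ⟨by omega, ih1, ih2, ?_⟩
    intro x hx y hy
    omega

theorem pvRecA_eq (l r : Int) (order : List Int) :
    pvRecA l r order = order ++ pvP l r := by
  fun_induction pvRecA l r order with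
  | case1 l r order h => rw [pvP]; simp [h]
  | case2 l r order h mid ih1 ih2 ih3 =>
    rw [ih3, ih1]
    conv_rhs => rw [pvP.eq_def]
    rw [dif_neg h]
    show order ++ [mid] ++ pvP l (mid - 1) ++ pvP (mid + 1) r =
      order ++ (mid :: (pvP l (mid - 1) ++ pvP (mid + 1) r))
    simp [List.append_assoc]

theorem pvLoopB_eq (stack : List (Int × Int)) (result : List Int) :
    pvLoopB stack result = result ++ (stack.map (fun p => pvConv (pvP p.1 p.2))).flatten := by
  fun_induction pvLoopB stack result with
  | case1 result => simp
  | case2 res l r rest h ih =>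
    rw [ih]
    simp only [List.map_cons, List.flatten_cons]
    rw [pvP.eq_def, dif_pos h]
    simp [pvConv]
  | case3 res l r rest h mid ih =>
    by_cases hm : mid ≥ 1
    · simp only [dif_pos hm] at ih
      simp only [if_pos hm]
      rw [ih]
      simp only [List.map_cons, List.flatten_cons]
      conv_rhs => rw [pvP.eq_def]
      rw [dif_neg h, show PySem.Int.floordiv (l + r) 2 = mid from rfl]
      simp only [pvConv, List.filterMap_cons, List.filterMap_append, if_pos hm,
        List.append_assoc, List.cons_append, List.nil_append]
    · simp only [dif_neg hm] at ih
      simp only [if_neg hm]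
      rw [ih]
      simp only [List.map_cons, List.flatten_cons]
      conv_rhs => rw [pvP.eq_def]
      rw [dif_neg h, show PySem.Int.floordiv (l + r) 2 = mid from rfl]
      simp only [pvConv, List.filterMap_cons, List.filterMap_append, if_neg hm, List.append_assoc]

theorem pvConvLoopA (n : Int) : ∀ (xs : List Int) (s : PySem.Set Int) (acc : List Int),
    (pvConvN n xs).Nodup → (∀ p ∈ pvConvN n xs, p ∉ s) →
    xs.foldl (fun (st : PySem.Set Int × List Int) idx =>
        if idx < 1 ∨ idx > n then st
        else
          let pos := idx - 1
          if pos ∈ st.1 then st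
          else (PySem.Set.add st.1 pos, st.2 ++ [pos])) (s, acc)
      = (PySem.Set.update s (pvConvN n xs), acc ++ pvConvN n xs) := by
  intro xs
  induction xs with
  | nil => intro s acc _ _; simp [pvConvN, PySem.Set.update]
  | cons x xs ih =>
    intro s acc hnd hdisj
    by_cases hx : x < 1 ∨ x > n
    · have hcn : pvConvN n (x :: xs) = pvConvN n xs := by
        simp [pvConvN, if_pos hx]
      rw [hcn] at hnd hdisj ⊢
      rw [List.foldl_cons, if_pos hx]
      exact ih s acc hnd hdisj
    · have hcn : pvConvN n (x :: xs) = (x - 1) :: pvConvN n xs := by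
        simp [pvConvN, if_neg hx]
      rw [hcn] at hnd hdisj
      have hpos_notmem : (x - 1) ∉ s := hdisj _ (List.mem_cons_self ..)
      rw [List.foldl_cons, if_neg hx]
      simp only [List.nodup_cons] at hnd
      have hrec := ih (PySem.Set.add s (x - 1)) (acc ++ [x - 1]) hnd.2 (by
        intro p hp hmem
        rw [PySem.Set.mem_add] at hmem
        rcases hmem with h' | h'
        · exact hdisj _ (List.mem_cons_of_mem _ hp) h'
        · exact hnd.1 (h' ▸ hp))
      simp only [if_neg hpos_notmem]
      rw [hrec, hcn, PySem.Set.update_cons]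
      simp [List.append_assoc]

theorem pvFillA : ∀ (ps : List Int) (s : PySem.Set Int) (acc : List Int), (∀ p ∈ ps, p ∈ s) →
    ps.foldl (fun (st : PySem.Set Int × List Int) p =>
        if p ∈ st.1 then st else (st.1, st.2 ++ [p])) (s, acc) = (s, acc) := by
  intro ps
  induction ps with
  | nil => intro s acc _; rfl
  | cons p ps ih =>
    intro s acc h
    rw [List.foldl_cons, if_pos (h _ (List.mem_cons_self ..))]
    exact ih s acc (fun q hq => h _ (List.mem_cons_of_mem _ hq))

theorem pvConvN_order (n : Int) (hn : 1 ≤ n) :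
    pvConvN n (n :: pvP 0 (n - 1)) = (n - 1) :: pvConv (pvP 0 (n - 1)) := by
  rw [pvConvN, List.filterMap_cons]
  simp only [if_neg (show ¬(n < 1 ∨ n > n) by omega)]
  rw [pvConv]
  congr 1
  apply List.filterMap_congr
  intro m hm
  rw [mem_pvP] at hm
  by_cases h1 : m ≥ 1
  · rw [if_neg (by omega : ¬(m < 1 ∨ m > n)), if_pos h1]
  · rw [if_pos (Or.inl (show m < 1 by omega)), if_neg h1]

theorem pvMem_pvConv (xs : List Int) (p : Int) :
    p ∈ pvConv xs ↔ ∃ m ∈ xs, 1 ≤ m ∧ m - 1 = p := by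
  simp only [pvConv, List.mem_filterMap]
  constructor
  · rintro ⟨m, hm, hf⟩
    by_cases h1 : m ≥ 1
    · rw [if_pos h1] at hf
      exact ⟨m, hm, h1, by injection hf⟩
    · rw [if_neg h1] at hf; cases hf
  · rintro ⟨m, hm, h1, he⟩
    exact ⟨m, hm, by rw [if_pos h1, he]⟩

theorem pvNodup_order (n : Int) :
    ((n - 1) :: pvConv (pvP 0 (n - 1))).Nodup := by
  rw [List.nodup_cons]
  constructor
  · rw [pvMem_pvConv]
    rintro ⟨m, hm, h1, he⟩
    rw [mem_pvP] at hm
    omega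
  · apply List.Nodup.filterMap _ (nodup_pvP 0 (n - 1))
    intro a b c hca hcb
    by_cases ha : a ≥ 1 <;> by_cases hb : b ≥ 1 <;>
      simp only [if_pos, ha, hb, ite_false, Option.mem_def,
        Option.some_inj, reduceCtorEq] at hca hcb
    omega

-- ===== VERDICT (by name: the statement is the Claim_ definition above) =====
theorem compute_bridge_order_py_spec : Claim_equal_compute_bridge_order_py := by
  intro n _
  show compute_bridge_order_py n = compute_bridge_order_py_alt n
  unfold compute_bridge_order_py compute_bridge_order_py_alt
  rw [pvRecA_eq]
  by_cases hn : n < 1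
  · rw [if_pos hn]
    rw [pvP.eq_def, dif_pos (by omega : (0:Int) > n - 1)]
    have hr : PySem.List.pyRange 0 n 1 = [] := by
      simp [PySem.List.pyRange]; omega
    rw [List.append_nil, hr]
    simp only [List.nil_append, List.foldl_cons, List.foldl_nil, if_pos (Or.inl hn)]
  · rw [if_neg hn]
    have horder : ([] : List Int) ++ [n] ++ pvP 0 (n - 1) = n :: pvP 0 (n - 1) := by simp
    rw [horder]
    have hnd := pvNodup_order n
    rw [← pvConvN_order n (by omega)] at hnd
    rw [pvConvLoopA n (n :: pvP 0 (n - 1)) (PySem.Set.ofList []) [] hnd (by simp [PySem.Set.ofList])]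
    rw [pvFillA _ _ _ ?_]
    · rw [List.nil_append, pvConvN_order n (by omega), pvLoopB_eq]
      simp
    · intro p hp
      rw [PySem.List.mem_pyRange_one] at hp
      rw [PySem.Set.mem_update]
      right
      rw [pvConvN_order n (by omega), List.mem_cons]
      by_cases hp1 : p = n - 1
      · left; exact hp1
      · right
        rw [pvMem_pvConv]
        exact ⟨p + 1, by rw [mem_pvP]; omega, by omega, by omega⟩
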